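-- pv_equiv track=rewrite | github.com/RUNZHI01/Semantic-Communication | session_bootstrap/demo/openamp_control_plane_demo/server.py | last_log_entry
-- ===== SOURCE A (Python) =====
-- from typing import Any
--
-- def last_log_entry(entries: Any) -> str:
--     if not isinstance(entries, list):
--         return ""
--     for item in reversed(entries):
--         text = str(item or "").strip()
--         if text:
--             return text
--     return ""
-- ===== SOURCE B (Python) =====
-- def last_log_entry(entries):
--     if not isinstance(entries, list):
--         return ""
--     texts = [t for item in entries if (t := str(item or "").strip())]
--     return texts[-1] if texts else ""
-- ===== Notes on version B (the rewrite author's own statement) =====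
-- stated objective: alternative
-- what changed: Replaces the reverse scan with early exit by a forward pass that collects all stripped non-empty entries into a list and returns its last element (or '' if none).
import Mathlib
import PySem

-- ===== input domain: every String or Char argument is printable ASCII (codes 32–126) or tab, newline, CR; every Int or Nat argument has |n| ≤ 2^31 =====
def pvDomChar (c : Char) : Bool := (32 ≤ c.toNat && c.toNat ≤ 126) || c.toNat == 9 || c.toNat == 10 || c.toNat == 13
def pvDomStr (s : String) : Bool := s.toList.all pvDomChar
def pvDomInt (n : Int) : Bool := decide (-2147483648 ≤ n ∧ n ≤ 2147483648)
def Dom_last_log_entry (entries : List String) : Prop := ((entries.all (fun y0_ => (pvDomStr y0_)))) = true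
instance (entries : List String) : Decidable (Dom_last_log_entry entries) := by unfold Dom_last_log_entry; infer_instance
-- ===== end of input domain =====

-- B: forward pass collecting all stripped non-empty entries, return the last; A scans from the back with early exit (alternative decomposition, same cost).
-- Entries are Strings here, so Python's `str(item or "")` equals the item itself ("" stays ""); the isinstance guard never fires on List String.

-- ===== PORT A =====
-- the `for item in reversed(entries)` loop with early return
def lastLogEntryGoA : List String → String
  | [] => ""
  | item :: rest =>
      let text := PySem.Str.strip item
      if text ≠ "" then text else lastLogEntryGoA rest

def last_log_entry (entries : List String) : String :=
  lastLogEntryGoA entries.reverse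

-- ===== PORT B =====
def last_log_entry_alt (entries : List String) : String :=
  let texts := (entries.map (fun item => PySem.Str.strip item)).filter (fun t => t ≠ "")
  match texts.getLast? with
  | some t => t
  | none => ""

-- ===== PRECONDITION & SPEC =====
def Spec_last_log_entry (entries : List String) (out : String) : Prop := out = last_log_entry_alt entries
instance (entries : List String) (out : String) : Decidable (Spec_last_log_entry entries out) := by unfold Spec_last_log_entry; infer_instance

-- ===== CLAIM (what is proved, stated in full; the proofs are below) =====
def Claim_equal_last_log_entry : Prop := ∀ (entries : List String), Dom_last_log_entry entries → Spec_last_log_entry entries (last_log_entry entries)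

-- ===== LEMMAS AND PROOFS =====
theorem lastLogEntry_rev (l : List String) :
    lastLogEntryGoA l.reverse = last_log_entry_alt l := by
  induction l using List.reverseRecOn with
  | nil => rfl
  | append_singleton l x ih =>
      simp only [List.reverse_append, List.reverse_singleton, List.singleton_append,
        lastLogEntryGoA, last_log_entry_alt, List.map_append, List.filter_append,
        List.map_cons, List.map_nil, List.filter_cons, List.filter_nil] at *
      by_cases h : PySem.Str.strip x = ""
      · simp [h, ih]
      · simp [h]

-- ===== VERDICT (by name: the statement is the Claim_ definition above) =====
theorem last_log_entry_spec : Claim_equal_last_log_entry := by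
  intro entries _
  unfold Spec_last_log_entry last_log_entry
  exact lastLogEntry_rev entries
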